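-- pv_equiv track=rewrite | github.com/ini/euler | euler.py | digit_permutations
-- ===== SOURCE A (Python) =====
-- import itertools
-- from collections import Counter, defaultdict, deque
-- from typing import Any, Callable, Hashable, Iterable, Iterator
--
-- def digit_permutations(n: int) -> Iterator[int]:
--     """
--     Generate all unique permutations of the digits in integer n.
--
--     Parameters
--     ----------
--     n : int
--         Integer whose digit to permute
--     """
--     digits = f'{abs(n)}'
--     sign = -1 if n < 0 else 1
--
--     # Fast path: all digits distinct -> just use permutations
--     if len(set(digits)) == len(digits):
--         for p in itertools.permutations(digits):
--             if p[0] != '0':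
--                 yield sign * int(''.join(p))
--         return
--
--     # General path: multiset permutations via digit counts
--     counts, length = Counter(map(int, digits)), len(digits)
--
--     def backtrack(pos: int, cur: int) -> Iterator[int]:
--         if pos == length:
--             yield sign * cur
--             return
--         for d in counts:
--             if counts[d] and (pos or d): # no leading zero
--                 counts[d] -= 1
--                 yield from backtrack(pos + 1, cur * 10 + d)
--                 counts[d] += 1
--
--     yield from backtrack(0, 0)
-- ===== SOURCE B (Python) =====
-- def digit_permutations(n: int):
--     """Unique digit permutations of n, iteratively: one explicit-stack DFS over
--     (position, accumulated value, remaining digit counts) states -- no recursion,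
--     no separate distinct-digits fast path."""
--     digits = str(abs(n))
--     sign = -1 if n < 0 else 1
--     keys, counts = [], []
--     for ch in digits:
--         d = int(ch)
--         if d in keys:
--             counts[keys.index(d)] += 1
--         else:
--             keys.append(d)
--             counts.append(1)
--     length = len(digits)
--     out = []
--     stack = [(0, 0, counts)]
--     while stack:
--         pos, cur, cnts = stack.pop()
--         if pos == length:
--             out.append(sign * cur)
--             continue
--         for i in range(len(keys) - 1, -1, -1):
--             if cnts[i] and (pos or keys[i]):
--                 nc = list(cnts)
--                 nc[i] -= 1
--                 stack.append((pos + 1, cur * 10 + keys[i], nc))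
--     return out
-- ===== Notes on version B (the rewrite author's own statement) =====
-- stated objective: alternative
-- what changed: Replaces A's two-branch design (itertools.permutations fast path for distinct digits plus a recursive generator backtracking over a Counter) by a single flat explicit-stack DFS over (position, accumulated value, remaining digit counts) states that covers both cases and yields the same values in the same order.
import Mathlib
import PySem

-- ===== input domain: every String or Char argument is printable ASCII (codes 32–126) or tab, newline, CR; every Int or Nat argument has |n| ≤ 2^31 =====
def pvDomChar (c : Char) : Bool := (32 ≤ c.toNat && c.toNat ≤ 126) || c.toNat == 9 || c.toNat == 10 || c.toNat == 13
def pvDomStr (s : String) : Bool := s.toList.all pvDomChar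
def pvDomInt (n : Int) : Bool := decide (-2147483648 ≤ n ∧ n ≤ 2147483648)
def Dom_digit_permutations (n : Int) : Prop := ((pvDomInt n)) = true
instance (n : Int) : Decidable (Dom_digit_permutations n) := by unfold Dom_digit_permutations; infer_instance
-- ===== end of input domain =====

-- B replaces A's two branches (itertools fast path + recursive Counter backtracking) by one
-- explicit-stack DFS over (position, value, remaining counts) states; same values, same order.

-- ===== PORT A =====
-- int(ch) for a single character (A: Counter(map(int, digits)); B: d = int(ch))
def pvCharInt (c : Char) : Int := (PySem.Int.ofChars? [c]).getD 0

-- all ways to pick one element of xs (with the remainder), in index order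
def pvPicks {α : Type} : List α → List (α × List α)
  | [] => []
  | x :: xs => (x, xs) :: (pvPicks xs).map (fun p => (p.1, x :: p.2))

-- itertools.permutations(xs) at full length: tuples in index-lexicographic order (exact)
def pvPerms {α : Type} : Nat → List α → List (List α)
  | 0, _ => [[]]
  | k + 1, xs => (pvPicks xs).flatMap (fun p => (pvPerms k p.2).map (p.1 :: ·))

-- int(''.join(p)), ported by hand (PySem.Int.digitVal? per character); exact for the
-- nonempty decimal-digit-only strings p that A feeds it (every p is a permutation of
-- the digits of str(abs(n))), where int() is plain base-10 positional parsing
def pvJoinInt (p : List Char) : Int :=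
  p.foldl (fun a c => a * 10 + ((PySem.Int.digitVal? c).getD 0 : Nat)) 0

-- backtrack(pos, cur): the Counter that Python mutates and restores is threaded as a
-- value; fuel ≥ length - pos makes the recursion structural (never exhausted below)
def pvBtA (sign : Int) (len : Nat) : Nat → Nat → PySem.Dict Int Int → Int → List Int
  | fuel, pos, counts, cur =>
    if pos = len then [sign * cur]
    else
      match fuel with
      | 0 => []
      | f + 1 =>
        counts.keys.foldl (fun acc d =>
          if counts.getD d 0 ≠ 0 ∧ (pos ≠ 0 ∨ d ≠ 0) then
            acc ++ pvBtA sign len f (pos + 1) (counts.modify d 0 (· - 1)) (cur * 10 + d)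
          else acc) []

def digit_permutations (n : Int) : List Int :=
  let digits : List Char := PySem.Int.toChars |n|
  let sign : Int := if n < 0 then -1 else 1
  if (PySem.Set.ofList digits).length = digits.length then
    (pvPerms digits.length digits).foldl (fun acc p =>
      if PySem.List.pyGet? p 0 ≠ some '0' then acc ++ [sign * pvJoinInt p] else acc) []
  else
    pvBtA sign digits.length digits.length 0 (PySem.Dict.counter (digits.map pvCharInt)) 0

-- ===== PORT B =====
-- one step of B's key/count building loop over the characters of str(abs(n))
def pvBuildStep (kc : List Int × List Int) (ch : Char) : List Int × List Int :=
  let d := pvCharInt ch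
  if d ∈ kc.1 then
    match PySem.List.index? kc.1 d with
    | some i => (kc.1, kc.2.set i (kc.2.getD i 0 + 1))
    | none => kc   -- unreachable: d ∈ keys
  else (kc.1 ++ [d], kc.2 ++ [1])

-- B's while-loop over the explicit stack (top = head); fuel makes it structural and
-- the initial fuel below provably suffices (proved in the lemmas)
def pvLoop (sign : Int) (len : Nat) (keys : List Int) :
    Nat → List (Nat × Int × List Int) → List Int → List Int
  | _, [], out => out
  | 0, _ :: _, out => out
  | f + 1, (pos, cur, cnts) :: stack, out =>
    if pos = len then pvLoop sign len keys f stack (out ++ [sign * cur])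
    else
      pvLoop sign len keys f
        ((PySem.List.pyRange ((keys.length : Int) - 1) (-1) (-1)).foldl (fun st i =>
          if PySem.List.pyGetD cnts i 0 ≠ 0 ∧ (pos ≠ 0 ∨ PySem.List.pyGetD keys i 0 ≠ 0) then
            (pos + 1, cur * 10 + PySem.List.pyGetD keys i 0,
              PySem.List.pySetD cnts i (PySem.List.pyGetD cnts i 0 - 1)) :: st
          else st) stack) out

def digit_permutations_alt (n : Int) : List Int :=
  let digits : List Char := PySem.Int.toChars |n|
  let sign : Int := if n < 0 then -1 else 1
  let kc := digits.foldl pvBuildStep ([], [])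
  pvLoop sign digits.length kc.1 ((kc.1.length + 1) ^ (digits.length + 1)) [(0, 0, kc.2)] []

-- ===== PRECONDITION & SPEC =====
def Spec_digit_permutations (n : Int) (out : List Int) : Prop := out = digit_permutations_alt n
instance (n : Int) (out : List Int) : Decidable (Spec_digit_permutations n out) := by unfold Spec_digit_permutations; infer_instance

-- ===== CLAIM (what is proved, stated in full; the proofs are below) =====
def Claim_equal_digit_permutations : Prop := ∀ (n : Int), Dom_digit_permutations n → Spec_digit_permutations n (digit_permutations n)

-- ===== LEMMAS AND PROOFS =====

-- the common reference recursion: multiset permutations over the fixed key list K,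
-- counts represented as a function
def pvM (sign : Int) (L : Nat) (K : List Int) (pos : Nat) (cnt : Int → Int) (cur : Int) : List Int :=
  if L ≤ pos then (if pos = L then [sign * cur] else [])
  else K.foldl (fun acc d =>
    if cnt d ≠ 0 ∧ (pos ≠ 0 ∨ d ≠ 0) then
      acc ++ pvM sign L K (pos + 1) (fun x => if x = d then cnt d - 1 else cnt x) (cur * 10 + d)
    else acc) []
termination_by L - pos
decreasing_by omega

-- L1 digit char facts
theorem pv_isdigit_bounds (c : Char) (h : PySem.Chars.isdigit c = true) :
    48 ≤ c.toNat ∧ c.toNat ≤ 57 := by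
  simp [PySem.Chars.isdigit, Char.le_def, decide_eq_true_iff] at h
  exact ⟨h.1, h.2⟩

theorem pvCharInt_digit (c : Char) (h : PySem.Chars.isdigit c = true) :
    pvCharInt c = (c.toNat : Int) - 48 := by
  obtain ⟨h1, h2⟩ := pv_isdigit_bounds c h
  rw [← Char.ofNat_toNat c]
  set m := c.toNat with hm
  interval_cases m <;> decide

theorem pvDigitVal_digit (c : Char) (h : PySem.Chars.isdigit c = true) :
    (PySem.Int.digitVal? c).getD 0 = c.toNat - 48 := by
  have hd : c.isDigit = true := by
    obtain ⟨h1, h2⟩ := pv_isdigit_bounds c h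
    simp [Char.isDigit, UInt32.le_iff_toNat_le, decide_eq_true_iff]
    constructor <;> [exact h1; exact h2]
  simp [PySem.Int.digitVal?, hd]

theorem pvCharInt_inj (c c' : Char) (hc : PySem.Chars.isdigit c = true)
    (hc' : PySem.Chars.isdigit c' = true) (h : pvCharInt c = pvCharInt c') : c = c' := by
  rw [pvCharInt_digit c hc, pvCharInt_digit c' hc'] at h
  have : c.toNat = c'.toNat := by omega
  rw [← Char.ofNat_toNat c, this, Char.ofNat_toNat]

theorem pvCharInt_zero_iff (c : Char) (hc : PySem.Chars.isdigit c = true) :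
    pvCharInt c = 0 ↔ c = '0' := by
  rw [pvCharInt_digit c hc]
  obtain ⟨h1, h2⟩ := pv_isdigit_bounds c hc
  constructor
  · intro h; have : c.toNat = 48 := by omega
    rw [← Char.ofNat_toNat c, this]
  · intro h; subst h; decide

-- L2 toChars facts
theorem pv_toChars_digits (n : Int) (hn : 0 ≤ n) :
    ∀ c ∈ PySem.Int.toChars n, PySem.Chars.isdigit c = true := by
  intro c hc
  unfold PySem.Int.toChars at hc
  rw [if_neg (by omega)] at hc
  have := Nat.isDigit_of_mem_toDigits (by norm_num) (by norm_num) hc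
  simp [Char.isDigit, UInt32.le_iff_toNat_le, decide_eq_true_iff] at this
  simp [PySem.Chars.isdigit, Char.le_def, decide_eq_true_iff]
  exact ⟨this.1, this.2⟩

theorem pv_toChars_ne_nil (n : Int) (hn : 0 ≤ n) : PySem.Int.toChars n ≠ [] := by
  unfold PySem.Int.toChars
  rw [if_neg (by omega)]
  have := @Nat.length_toDigits_pos 10 n.toNat
  intro h; rw [h] at this; simp at this

-- L3 Set facts
theorem pv_foldl_add_sublist {α : Type} [BEq α] [LawfulBEq α] :
    ∀ (xs s : List α), ∃ t, t.Sublist xs ∧ List.foldl PySem.Set.add s xs = s ++ t := by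
  intro xs
  induction xs with
  | nil => exact fun s => ⟨[], List.Sublist.refl _, by simp⟩
  | cons x xs ih =>
    intro s
    by_cases hx : x ∈ s
    · obtain ⟨t, ht, he⟩ := ih s
      refine ⟨t, ht.cons x, ?_⟩
      simpa [PySem.Set.add, List.contains_iff_mem, hx] using he
    · obtain ⟨t, ht, he⟩ := ih (s ++ [x])
      refine ⟨x :: t, ht.cons₂ x, ?_⟩
      simpa [PySem.Set.add, List.contains_iff_mem, hx] using he

theorem pv_nodup_of_setlen {α : Type} [BEq α] [LawfulBEq α] (xs : List α)
    (h : (PySem.Set.ofList xs).length = xs.length) : xs.Nodup := by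
  obtain ⟨t, ht, he⟩ := pv_foldl_add_sublist xs ([] : List α)
  have : PySem.Set.ofList xs = t := by simpa [PySem.Set.ofList] using he
  have hx : t = xs := ht.eq_of_length (by rw [← this]; exact h)
  have hnd := PySem.Set.nodup_ofList xs
  rwa [this, hx] at hnd

theorem pv_ofList_of_nodup {α : Type} [BEq α] [LawfulBEq α] (xs : List α)
    (h : xs.Nodup) : PySem.Set.ofList xs = xs := by
  obtain ⟨t, ht, he⟩ := pv_foldl_add_sublist xs ([] : List α)
  have h1 : PySem.Set.ofList xs = t := by simpa [PySem.Set.ofList] using he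
  rw [h1]
  -- t sublist of xs with the same members; xs nodup ⇒ t = xs
  have hmem : ∀ a, a ∈ t ↔ a ∈ xs := by
    intro a
    rw [← h1, PySem.Set.mem_ofList]
  have hlen : xs.length ≤ t.length :=
    (h.subperm (fun a ha => (hmem a).mpr ha)).length_le
  exact ht.eq_of_length (le_antisymm ht.length_le hlen)

-- L4 fold/flatMap shapes
theorem pv_foldl_if_append {α β : Type} (Q : α → Prop) [DecidablePred Q] (g : α → List β) :
    ∀ (l : List α) (a : List β),
      l.foldl (fun acc x => if Q x then acc ++ g x else acc) a
        = a ++ l.flatMap (fun x => if Q x then g x else []) := by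
  intro l
  induction l with
  | nil => simp
  | cons x l ih =>
    intro a
    by_cases hx : Q x <;> simp [hx, ih, List.append_assoc]

theorem pv_foldr_consif {α β : Type} (Q : α → Prop) [DecidablePred Q] (g : α → β) :
    ∀ (l : List α) (st : List β),
      l.foldr (fun x st => if Q x then g x :: st else st) st
        = (l.filter (fun x => decide (Q x))).map g ++ st := by
  intro l
  induction l with
  | nil => simp
  | cons x l ih =>
    intro st
    by_cases hx : Q x <;> simp [hx, ih]

theorem pv_flatMap_filter {α β : Type} (Q : α → Prop) [DecidablePred Q] (g : α → List β) :
    ∀ (l : List α),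
      (l.filter (fun x => decide (Q x))).flatMap g
        = l.flatMap (fun x => if Q x then g x else []) := by
  intro l
  induction l with
  | nil => simp
  | cons x l ih => by_cases hx : Q x <;> simp [hx, ih]

theorem pv_range_flatMap_eq {β : Type} :
    ∀ (K : List Int) (body : Nat → List β) (bodyE : Int → List β),
      (∀ i (hi : i < K.length), body i = bodyE (K[i])) →
      (List.range K.length).flatMap body = K.flatMap bodyE := by
  intro K
  induction K with
  | nil => simp
  | cons d K ih =>
    intro body bodyE h
    rw [List.length_cons, List.range_succ_eq_map]
    simp only [List.flatMap_cons, List.flatMap_map]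
    rw [h 0 (by simp), ih (fun i => body (i + 1)) bodyE
      (fun i hi => by simpa using h (i + 1) (by simpa using hi))]
    rfl

-- L5 picks and perms facts
theorem pv_mem_picks {α : Type} :
    ∀ (rs : List α) (p : α × List α), p ∈ pvPicks rs →
      ∃ pre suf, rs = pre ++ p.1 :: suf ∧ p.2 = pre ++ suf := by
  intro rs
  induction rs with
  | nil => simp [pvPicks]
  | cons x xs ih =>
    intro p hp
    simp only [pvPicks, List.mem_cons, List.mem_map] at hp
    rcases hp with h | ⟨q, hq, rfl⟩
    · exact ⟨[], xs, by simp [h]⟩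
    · obtain ⟨pre, suf, h1, h2⟩ := ih q hq
      exact ⟨x :: pre, suf, by simp [h1, h2]⟩

theorem pv_picks_sublist {α : Type} (rs : List α) (p : α × List α) (hp : p ∈ pvPicks rs) :
    p.2.Sublist rs := by
  obtain ⟨pre, suf, h1, h2⟩ := pv_mem_picks rs p hp
  rw [h1, h2]
  exact (List.sublist_cons_self p.1 suf).append_left pre

theorem pv_picks_len {α : Type} (rs : List α) (p : α × List α) (hp : p ∈ pvPicks rs) :
    p.2.length + 1 = rs.length := by
  obtain ⟨pre, suf, h1, h2⟩ := pv_mem_picks rs p hp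
  rw [h1, h2]; simp; omega

theorem pv_perms_perm {α : Type} :
    ∀ (k : Nat) (rs : List α), k = rs.length → ∀ p ∈ pvPerms k rs, p.Perm rs := by
  intro k
  induction k with
  | zero => intro rs hk p hp; simp [pvPerms] at hp; subst hp
            rw [List.length_eq_zero_iff.mp hk.symm]
  | succ k ih =>
    intro rs hk p hp
    simp only [pvPerms, List.mem_flatMap, List.mem_map] at hp
    obtain ⟨q, hq, r, hr, rfl⟩ := hp
    obtain ⟨pre, suf, h1, h2⟩ := pv_mem_picks rs q hq
    have hlen : k = q.2.length := by have := pv_picks_len rs q hq; omega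
    have := ih q.2 hlen r hr
    rw [h1, h2] at *
    exact (this.cons q.1).trans (List.perm_middle).symm

-- E1: port A's general-path backtracking equals the reference recursion
theorem pv_btA_eq_pvM (sign : Int) (L : Nat) :
    ∀ (fuel pos : Nat) (d : PySem.Dict Int Int) (cur : Int),
      pos ≤ L → L - pos ≤ fuel →
      pvBtA sign L fuel pos d cur = pvM sign L d.keys pos (fun k => d.getD k 0) cur := by
  intro fuel
  induction fuel with
  | zero =>
    intro pos d cur h1 h2
    have hpl : pos = L := by omega
    rw [pvBtA, pvM]
    simp [hpl]
  | succ f ih =>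
    intro pos d cur h1 h2
    rw [pvBtA, pvM]
    by_cases hpl : pos = L
    · simp [hpl]
    · rw [if_neg hpl, if_neg (by omega : ¬ L ≤ pos)]
      apply PySem.List.foldl_congr_mem
      intro acc x hx
      by_cases hc : d.getD x 0 ≠ 0 ∧ (pos ≠ 0 ∨ x ≠ 0)
      · rw [if_pos hc, if_pos hc]
        congr 1
        rw [ih (pos + 1) (d.modify x 0 (· - 1)) (cur * 10 + x) (by omega) (by omega)]
        have hkeys : (d.modify x 0 (· - 1)).keys = d.keys := by
          rw [PySem.Dict.keys_modify]
          exact PySem.Dict.keys_insert_of_contains d _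
            ((PySem.Dict.contains_iff_mem_keys d x).mpr hx)
        rw [hkeys]
        congr 1
        funext k
        rw [PySem.Dict.getD_modify]
      · rw [if_neg hc, if_neg hc]

-- counts-as-function of a remaining multiset of (distinct) digit characters
def pvCntOf (l : List Char) : Int → Int := fun t => if t ∈ l.map pvCharInt then 1 else 0

theorem pv_cv_mem_iff (l : List Char) (x : Char) (hdig : ∀ c ∈ l, PySem.Chars.isdigit c = true)
    (hx : PySem.Chars.isdigit x = true) : pvCharInt x ∈ l.map pvCharInt ↔ x ∈ l := by
  constructor
  · intro h
    obtain ⟨y, hy, he⟩ := List.mem_map.mp h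
    rwa [pvCharInt_inj y x (hdig y hy) hx he] at hy
  · exact fun h => List.mem_map.mpr ⟨x, h, rfl⟩

-- one level of the reference recursion: iterating the fixed key list with 0/1 counts
-- (E = committed-elsewhere context) equals iterating the picks of the remaining list rs
theorem pv_ind (P : Int → Prop) [DecidablePred P] (F : Int → (Int → Int) → List Int) :
    ∀ {rs ds : List Char}, rs.Sublist ds → ∀ E : List Char,
      (∀ c ∈ E ++ ds, PySem.Chars.isdigit c = true) → (E ++ ds).Nodup →
      ds.flatMap (fun x =>
        if pvCntOf (E ++ rs) (pvCharInt x) ≠ 0 ∧ P (pvCharInt x) then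
          F (pvCharInt x)
            (fun t => if t = pvCharInt x then pvCntOf (E ++ rs) (pvCharInt x) - 1
                      else pvCntOf (E ++ rs) t)
        else [])
      = (pvPicks rs).flatMap (fun p =>
          if P (pvCharInt p.1) then F (pvCharInt p.1) (pvCntOf (E ++ p.2)) else []) := by
  intro rs ds hsub
  induction hsub with
  | slnil => intro E _ _; simp [pvPicks]
  | @cons rs ds' x h ih =>
    intro E hdig hnd
    have hdig' : ∀ c ∈ E ++ ds', PySem.Chars.isdigit c = true := by
      intro c hc; apply hdig; simp at hc ⊢; tauto
    have hnd' : (E ++ ds').Nodup := by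
      rw [List.nodup_append] at hnd ⊢
      refine ⟨hnd.1, (List.nodup_cons.mp hnd.2.1).2, ?_⟩
      intro a ha b hb; exact hnd.2.2 a ha b (by simp [hb]) 
    have hxdig : PySem.Chars.isdigit x = true := hdig x (by simp)
    have hxE : x ∉ E := by
      rw [List.nodup_append] at hnd
      intro hxe; exact hnd.2.2 x hxe x (by simp) rfl
    have hxds : x ∉ ds' := by
      rw [List.nodup_append] at hnd
      exact (List.nodup_cons.mp hnd.2.1).1
    rw [List.flatMap_cons, ← ih E hdig' hnd']
    have hzero : pvCntOf (E ++ rs) (pvCharInt x) = 0 := by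
      unfold pvCntOf
      rw [if_neg]
      intro hm
      have hdigEr : ∀ c ∈ E ++ rs, PySem.Chars.isdigit c = true := by
        intro c hc
        apply hdig; simp at hc ⊢
        rcases hc with hc | hc
        · tauto
        · exact Or.inr (Or.inr (h.mem hc))
      have := (pv_cv_mem_iff (E ++ rs) x hdigEr hxdig).mp hm
      simp at this
      rcases this with hc | hc
      · exact hxE hc
      · exact hxds (h.mem hc)
    rw [if_neg (by simp [hzero])]
    simp
  | @cons₂ rs' ds' x h ih =>
    intro E hdig hnd
    have hxdig : PySem.Chars.isdigit x = true := hdig x (by simp)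
    have hxE : x ∉ E := by
      rw [List.nodup_append] at hnd
      intro hxe; exact hnd.2.2 x hxe x (by simp) rfl
    have hxds : x ∉ ds' := by
      rw [List.nodup_append] at hnd
      exact (List.nodup_cons.mp hnd.2.1).1
    have hxrs : x ∉ rs' := fun hc => hxds (h.mem hc)
    have hdigErs' : ∀ c ∈ E ++ rs', PySem.Chars.isdigit c = true := by
      intro c hc; apply hdig; simp at hc ⊢
      rcases hc with hc | hc
      · tauto
      · exact Or.inr (Or.inr (h.mem hc))
    have hmemx : pvCharInt x ∈ (E ++ x :: rs').map pvCharInt := by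
      apply List.mem_map.mpr; exact ⟨x, by simp, rfl⟩
    have hnotx : pvCharInt x ∉ (E ++ rs').map pvCharInt := by
      intro hm
      have := (pv_cv_mem_iff (E ++ rs') x hdigErs' hxdig).mp hm
      simp at this; tauto
    -- head terms agree
    have hhead : (if pvCntOf (E ++ x :: rs') (pvCharInt x) ≠ 0 ∧ P (pvCharInt x) then
          F (pvCharInt x)
            (fun t => if t = pvCharInt x then pvCntOf (E ++ x :: rs') (pvCharInt x) - 1
                      else pvCntOf (E ++ x :: rs') t)
        else [])
        = (if P (pvCharInt x) then F (pvCharInt x) (pvCntOf (E ++ rs')) else []) := by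
      have h1 : pvCntOf (E ++ x :: rs') (pvCharInt x) = 1 := by
        unfold pvCntOf; rw [if_pos hmemx]
      by_cases hp : P (pvCharInt x)
      · rw [if_pos ⟨by rw [h1]; norm_num, hp⟩, if_pos hp]
        congr 1
        funext t
        by_cases ht : t = pvCharInt x
        · rw [if_pos ht, h1]
          unfold pvCntOf
          rw [ht, if_neg hnotx]
          norm_num
        · rw [if_neg ht]
          unfold pvCntOf
          have : t ∈ (E ++ x :: rs').map pvCharInt ↔ t ∈ (E ++ rs').map pvCharInt := by
            simp only [List.map_append, List.mem_append, List.map_cons, List.mem_cons]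
            tauto
          by_cases hm : t ∈ (E ++ rs').map pvCharInt
          · rw [if_pos (this.mpr hm), if_pos hm]
          · rw [if_neg (fun hc => hm (this.mp hc)), if_neg hm]
      · rw [if_neg (by tauto), if_neg hp]
    -- tails agree via ih with E := E ++ [x]
    have htail := ih (E ++ [x]) (by simpa using hdig) (by simpa using hnd)
    simp only [pvPicks, List.flatMap_cons, List.flatMap_map]
    rw [hhead]
    congr 1
    -- LHS tail: rewrite context list (E ++ x :: rs') as ((E ++ [x]) ++ rs')
    have hctx : E ++ x :: rs' = (E ++ [x]) ++ rs' := by simp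
    rw [hctx, htail]
    simp

-- G1: below the top level (pos ≥ 1) the itertools-style permutations of the remaining
-- characters, folded into numbers, equal the reference recursion
theorem pv_G1 (sign : Int) (ds : List Char) (hdig : ∀ c ∈ ds, PySem.Chars.isdigit c = true)
    (hnd : ds.Nodup) :
    ∀ (k : Nat) (rs : List Char), rs.Sublist ds → k = rs.length → ∀ (pos : Nat) (cur : Int),
      pos + k = ds.length → 1 ≤ pos →
      (pvPerms k rs).map (fun p => sign * (p.foldl (fun a c => a * 10 + pvCharInt c) cur))
        = pvM sign ds.length (ds.map pvCharInt) pos (pvCntOf rs) cur := by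
  intro k
  induction k with
  | zero =>
    intro rs hsub hk pos cur hpk hpos
    rw [List.length_eq_zero_iff.mp hk.symm] at *
    rw [pvM, if_pos (by omega), if_pos (by omega)]
    simp [pvPerms]
  | succ k ih =>
    intro rs hsub hk pos cur hpk hpos
    -- RHS: unfold one level of pvM, turn the foldl into a flatMap over ds
    rw [pvM, if_neg (by omega)]
    rw [pv_foldl_if_append
      (fun d => pvCntOf rs d ≠ 0 ∧ (pos ≠ 0 ∨ d ≠ 0))
      (fun d => pvM sign ds.length (ds.map pvCharInt) (pos + 1)
        (fun x => if x = d then pvCntOf rs d - 1 else pvCntOf rs x) (cur * 10 + d))]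
    rw [List.nil_append, List.flatMap_map]
    have hIND := pv_ind (fun d => pos ≠ 0 ∨ d ≠ 0)
      (fun d cnt => pvM sign ds.length (ds.map pvCharInt) (pos + 1) cnt (cur * 10 + d))
      hsub [] (by simpa using hdig) (by simpa using hnd)
    simp only [List.nil_append] at hIND
    rw [hIND]
    -- LHS: one level of pvPerms
    rw [pvPerms, List.map_flatMap]
    apply List.flatMap_congr
    intro q hq
    rw [List.map_map]
    have hq2sub : q.2.Sublist ds := (pv_picks_sublist rs q hq).trans hsub
    have hq2len : k = q.2.length := by have := pv_picks_len rs q hq; omega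
    have := ih q.2 hq2sub hq2len (pos + 1) (cur * 10 + pvCharInt q.1) (by omega) (by omega)
    rw [if_pos (Or.inl (by omega : pos ≠ 0)), ← this]
    rfl

-- the A fast path (distinct digits) equals the reference recursion from the root
theorem pv_fast (sign : Int) (ds : List Char) (hdig : ∀ c ∈ ds, PySem.Chars.isdigit c = true)
    (hnd : ds.Nodup) (hne : ds ≠ []) :
    (pvPerms ds.length ds).foldl (fun acc p =>
        if PySem.List.pyGet? p 0 ≠ some '0' then acc ++ [sign * pvJoinInt p] else acc) []
      = pvM sign ds.length (ds.map pvCharInt) 0 (pvCntOf ds) 0 := by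
  obtain ⟨L', hL⟩ : ∃ L', ds.length = L' + 1 := by
    cases h : ds.length with
    | zero => exact absurd (List.length_eq_zero_iff.mp h) hne
    | succ m => exact ⟨m, rfl⟩
  -- LHS to flatMap form
  rw [pv_foldl_if_append (fun p => PySem.List.pyGet? p 0 ≠ some '0')
    (fun p => [sign * pvJoinInt p])]
  rw [List.nil_append]
  conv_lhs => rw [hL]
  rw [pvPerms, List.flatMap_assoc]
  -- RHS to picks form
  rw [pvM, if_neg (by omega)]
  rw [pv_foldl_if_append
    (fun d => pvCntOf ds d ≠ 0 ∧ ((0:Nat) ≠ 0 ∨ d ≠ 0))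
    (fun d => pvM sign ds.length (ds.map pvCharInt) (0 + 1)
      (fun x => if x = d then pvCntOf ds d - 1 else pvCntOf ds x) (0 * 10 + d))]
  rw [List.nil_append, List.flatMap_map]
  have hIND := pv_ind (fun d => (0:Nat) ≠ 0 ∨ d ≠ 0)
    (fun d cnt => pvM sign ds.length (ds.map pvCharInt) (0 + 1) cnt (0 * 10 + d))
    (List.Sublist.refl ds) [] (by simpa using hdig) (by simpa using hnd)
  simp only [List.nil_append] at hIND
  rw [hIND]
  apply List.flatMap_congr
  intro q hq
  have hq1dig : PySem.Chars.isdigit q.1 = true := by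
    obtain ⟨pre, suf, h1, _⟩ := pv_mem_picks ds q hq
    exact hdig q.1 (by rw [h1]; simp)
  have hq2dig : ∀ c ∈ q.2, PySem.Chars.isdigit c = true := by
    intro c hc
    exact hdig c ((pv_picks_sublist ds q hq).mem hc)
  have hq2sub : q.2.Sublist ds := pv_picks_sublist ds q hq
  have hq2len : q.2.length = L' := by have := pv_picks_len ds q hq; omega
  -- inner flatMap: guard depends only on the head q.1
  have hguard : ∀ p, PySem.List.pyGet? (q.1 :: p) 0 ≠ some '0' ↔ pvCharInt q.1 ≠ 0 := by
    intro p
    rw [PySem.List.pyGet?_zero_cons]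
    simp only [ne_eq, Option.some.injEq]
    rw [pvCharInt_zero_iff q.1 hq1dig]
  by_cases hz : pvCharInt q.1 = 0
  · -- leading zero: both sides empty
    rw [if_neg (by simp [hz])]
    apply List.flatMap_eq_nil_iff.mpr
    intro l hl
    obtain ⟨p, hp, rfl⟩ := List.mem_map.mp hl
    show (if PySem.List.pyGet? (q.1 :: p) 0 ≠ some '0'
        then [sign * pvJoinInt (q.1 :: p)] else []) = []
    rw [if_neg (by rw [hguard p]; simp [hz])]
  · rw [if_pos (Or.inr hz)]
    have hstep : ∀ p ∈ pvPerms L' q.2,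
        (if PySem.List.pyGet? (q.1 :: p) 0 ≠ some '0'
          then [sign * pvJoinInt (q.1 :: p)] else [])
        = [sign * ((q.1 :: p).foldl (fun a c => a * 10 + pvCharInt c) 0)] := by
      intro p hp
      rw [if_pos ((hguard p).mpr hz)]
      congr 1
      have hperm := pv_perms_perm L' q.2 hq2len.symm p hp
      unfold pvJoinInt
      rw [List.foldl_cons, List.foldl_cons]
      have hd : ∀ c, PySem.Chars.isdigit c = true →
          ∀ a : Int, a * 10 + (((PySem.Int.digitVal? c).getD 0 : Nat) : Int)
            = a * 10 + pvCharInt c := by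
        intro c hc a
        rw [pvDigitVal_digit c hc, pvCharInt_digit c hc]
        have := pv_isdigit_bounds c hc
        push_cast [Nat.cast_sub (by omega : 48 ≤ c.toNat)]
        ring
      rw [hd q.1 hq1dig 0]
      congr 1
      apply PySem.List.foldl_congr_mem
      intro a c hc
      exact hd c (hq2dig c (hperm.mem_iff.mp hc)) a
    rw [List.flatMap_map]
    have h1 : (pvPerms L' q.2).flatMap
          (fun p => (fun r => if PySem.List.pyGet? r 0 ≠ some '0'
            then [sign * pvJoinInt r] else []) (q.1 :: p))
        = (pvPerms L' q.2).map
          (fun p => sign * ((q.1 :: p).foldl (fun a c => a * 10 + pvCharInt c) 0)) := by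
      rw [List.flatMap_congr hstep]
      exact Eq.symm List.map_eq_flatMap
    rw [h1]
    simp only [List.foldl_cons]
    have := pv_G1 sign ds hdig hnd L' q.2 hq2sub hq2len.symm 1
      (0 * 10 + pvCharInt q.1) (by omega) (by omega)
    rw [this]

-- lookup of a key's count through its position in the key list
def pvBLookup (keys cnts : List Int) (k : Int) : Int :=
  ((PySem.List.index? keys k).map (fun i => cnts.getD i 0)).getD 0

theorem pv_index?_getElem (K : List Int) (hnd : K.Nodup) (k : Nat) (hk : k < K.length) :
    PySem.List.index? K K[k] = some k := by
  rw [PySem.List.index?_eq_some_iff]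
  refine ⟨K.take k, K.drop (k + 1), ?_, by simp [hk.le], ?_⟩
  · rw [List.getElem_cons_drop, List.take_append_drop]
  · intro hmem
    obtain ⟨j, hj, he⟩ := List.getElem_of_mem hmem
    have hj' : j < k := by simpa [hk.le] using hj
    rw [List.getElem_take] at he
    exact absurd (hnd.getElem_inj_iff.mp he) (by omega)

theorem pv_build :
    ∀ (chs : List Char) (keys cnts : List Int), keys.Nodup → cnts.length = keys.length →
      (chs.foldl pvBuildStep (keys, cnts)).1
          = List.foldl PySem.Set.add keys (chs.map pvCharInt)
        ∧ (chs.foldl pvBuildStep (keys, cnts)).1.Nodup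
        ∧ (chs.foldl pvBuildStep (keys, cnts)).2.length
            = (chs.foldl pvBuildStep (keys, cnts)).1.length
        ∧ ∀ k, pvBLookup (chs.foldl pvBuildStep (keys, cnts)).1
                 (chs.foldl pvBuildStep (keys, cnts)).2 k
            = pvBLookup keys cnts k + ((chs.map pvCharInt).count k : Int) := by
  intro chs
  induction chs with
  | nil => intro keys cnts hnd hlen; exact ⟨rfl, hnd, hlen, by simp [List.count_nil]⟩
  | cons ch chs ih =>
    intro keys cnts hnd hlen
    simp only [List.foldl_cons, List.map_cons]
    by_cases hmem : pvCharInt ch ∈ keys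
    · -- existing key: counts[i] += 1
      obtain ⟨i, hi⟩ : ∃ i, PySem.List.index? keys (pvCharInt ch) = some i := by
        have := (PySem.List.index?_isSome_iff keys (pvCharInt ch)).mpr hmem
        exact Option.isSome_iff_exists.mp this
      obtain ⟨hilt, hgeti, -⟩ := PySem.List.getElem_of_index?_eq_some hi
      have hstep : pvBuildStep (keys, cnts) ch
          = (keys, cnts.set i (cnts.getD i 0 + 1)) := by
        unfold pvBuildStep
        rw [if_pos hmem, hi]
      rw [hstep]
      have hlen' : (cnts.set i (cnts.getD i 0 + 1)).length = keys.length := by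
        simpa using hlen
      obtain ⟨e1, e2, e3, e4⟩ := ih keys (cnts.set i (cnts.getD i 0 + 1)) hnd hlen'
      have hadd : PySem.Set.add keys (pvCharInt ch) = keys := by
        unfold PySem.Set.add
        rw [if_pos (by simpa [List.contains_iff_mem] using hmem)]
      refine ⟨by rw [e1, hadd], e2, e3, ?_⟩
      intro k
      rw [e4 k]
      have hstepcnt : pvBLookup keys (cnts.set i (cnts.getD i 0 + 1)) k
          = pvBLookup keys cnts k + (if k = pvCharInt ch then 1 else 0) := by
        unfold pvBLookup
        by_cases hk : k = pvCharInt ch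
        · subst hk
          rw [hi]
          simp only [Option.map_some, Option.getD_some, if_pos rfl]
          rw [List.getD_eq_getElem?_getD, List.getD_eq_getElem?_getD,
            List.getElem?_set_self (by omega)]
          simp [List.getElem?_eq_getElem (by omega : i < cnts.length)]
        · rw [if_neg hk]
          cases hj : PySem.List.index? keys k with
          | none => simp
          | some j =>
            obtain ⟨hjlt, hgetj, -⟩ := PySem.List.getElem_of_index?_eq_some hj
            have hij : j ≠ i := by intro he; subst he; exact hk (by rw [← hgetj, hgeti])
            simp only [Option.map_some, Option.getD_some]
            rw [List.getD_eq_getElem?_getD, List.getD_eq_getElem?_getD,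
              List.getElem?_set_ne (by omega)]
            simp
      rw [hstepcnt, List.count_cons]
      by_cases hk : k = pvCharInt ch <;> simp [hk] <;> omega
    · -- new key: append
      have hstep : pvBuildStep (keys, cnts) ch = (keys ++ [pvCharInt ch], cnts ++ [1]) := by
        unfold pvBuildStep
        rw [if_neg hmem]
      rw [hstep]
      have hnd' : (keys ++ [pvCharInt ch]).Nodup := by
        rw [List.nodup_append]
        exact ⟨hnd, List.nodup_singleton _, by
          intro a ha b hb
          simp at hb; subst hb
          exact fun he => hmem (he ▸ ha)⟩
      have hlen' : (cnts ++ [1]).length = (keys ++ [pvCharInt ch]).length := by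
        simp [hlen]
      obtain ⟨e1, e2, e3, e4⟩ := ih (keys ++ [pvCharInt ch]) (cnts ++ [1]) hnd' hlen'
      have hadd : PySem.Set.add keys (pvCharInt ch) = keys ++ [pvCharInt ch] := by
        unfold PySem.Set.add
        rw [if_neg (by simpa [List.contains_iff_mem] using hmem)]
      refine ⟨by rw [e1, hadd], e2, e3, ?_⟩
      intro k
      rw [e4 k]
      have hstepcnt : pvBLookup (keys ++ [pvCharInt ch]) (cnts ++ [1]) k
          = pvBLookup keys cnts k + (if k = pvCharInt ch then 1 else 0) := by
        unfold pvBLookup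
        by_cases hk : k = pvCharInt ch
        · subst hk
          rw [PySem.List.index?_append_singleton_self keys _ hmem,
            (PySem.List.index?_eq_none_iff keys _).mpr hmem]
          simp only [Option.map_some, Option.getD_some, Option.map_none, Option.getD_none,
            if_pos rfl]
          rw [List.getD_eq_getElem?_getD, List.getElem?_append_right (by omega), hlen]
          simp
        · rw [if_neg hk]
          by_cases hkm : k ∈ keys
          · rw [PySem.List.index?_append_of_mem [pvCharInt ch] hkm]
            cases hj : PySem.List.index? keys k with
            | none => simp
            | some j =>
              obtain ⟨hjlt, -, -⟩ := PySem.List.getElem_of_index?_eq_some hj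
              simp only [Option.map_some, Option.getD_some]
              rw [List.getD_eq_getElem?_getD, List.getD_eq_getElem?_getD,
                List.getElem?_append_left (by omega)]
              simp
          · rw [(PySem.List.index?_eq_none_iff keys _).mpr hkm,
              (PySem.List.index?_eq_none_iff _ _).mpr (by simp [hkm, hk])]
            simp
      rw [hstepcnt, List.count_cons]
      by_cases hk : k = pvCharInt ch <;> simp [hk] <;> omega

-- the modified counts list looks up as a pointwise-modified function
theorem pv_blookup_set (K cnts : List Int) (hnd : K.Nodup) (k : Nat)
    (hk : k < K.length) (hlen : cnts.length = K.length) (v : Int) :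
    pvBLookup K (cnts.set k v) = fun x => if x = K[k] then v else pvBLookup K cnts x := by
  funext x
  by_cases hx : x = K[k]
  · subst hx
    unfold pvBLookup
    rw [pv_index?_getElem K hnd k hk]
    simp only [Option.map_some, Option.getD_some, if_pos rfl]
    rw [List.getD_eq_getElem?_getD, List.getElem?_set_self (by omega)]
    simp
  · rw [if_neg hx]
    unfold pvBLookup
    cases hj : PySem.List.index? K x with
    | none => simp
    | some j =>
      obtain ⟨hjlt, hgetj, -⟩ := PySem.List.getElem_of_index?_eq_some hj
      have hjk : j ≠ k := by intro he; subst he; exact hx hgetj.symm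
      simp only [Option.map_some, Option.getD_some]
      rw [List.getD_eq_getElem?_getD, List.getD_eq_getElem?_getD,
        List.getElem?_set_ne (by omega)]

theorem pv_loop_eq (sign : Int) (L : Nat) (K : List Int) (hnd : K.Nodup) :
    ∀ (fuel : Nat) (stack : List (Nat × Int × List Int)) (out : List Int),
      (∀ fr ∈ stack, fr.1 ≤ L ∧ fr.2.2.length = K.length) →
      (stack.map (fun fr => (K.length + 1) ^ (L - fr.1 + 1))).sum ≤ fuel →
      pvLoop sign L K fuel stack out
        = out ++ stack.flatMap (fun fr => pvM sign L K fr.1 (pvBLookup K fr.2.2) fr.2.1) := by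
  intro fuel
  induction fuel with
  | zero =>
    intro stack out hfr hsum
    cases stack with
    | nil => simp [pvLoop]
    | cons fr rest =>
      exfalso
      have : 0 < (K.length + 1) ^ (L - fr.1 + 1) := Nat.pow_pos (by omega)
      simp only [List.map_cons, List.sum_cons] at hsum
      omega
  | succ f ih =>
    intro stack out hfr hsum
    cases stack with
    | nil => simp [pvLoop]
    | cons fr rest =>
      obtain ⟨pos, cur, cnts⟩ := fr
      obtain ⟨hposL, hclen⟩ := hfr _ (List.mem_cons_self ..)
      by_cases hpl : pos = L
      · rw [pvLoop, if_pos hpl]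
        rw [ih rest (out ++ [sign * cur]) (fun fr hf => hfr fr (by simp [hf]))
          (by
            simp only [List.map_cons, List.sum_cons] at hsum
            have : 0 < (K.length + 1) ^ (L - pos + 1) := Nat.pow_pos (by omega)
            omega)]
        subst hpl
        rw [List.flatMap_cons, pvM, if_pos le_rfl, if_pos rfl]
        simp
      · rw [pvLoop, if_neg hpl]
        have hposlt : pos < L := by omega
        -- convert the descending pyRange push loop into an explicit children list
        have hrange : PySem.List.pyRange ((K.length : Int) - 1) (-1) (-1)
            = ((List.range K.length).map (fun k : Nat => (k : Int))).reverse := by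
          rw [PySem.List.pyRange_neg_one_eq_reverse]
          congr 1
          norm_num
          rw [PySem.List.pyRange_one]
          simp
        rw [hrange, List.foldl_reverse]
        have hfoldr := pv_foldr_consif
          (fun i => PySem.List.pyGetD cnts i 0 ≠ 0 ∧ (pos ≠ 0 ∨ PySem.List.pyGetD K i 0 ≠ 0))
          (fun i => (pos + 1, cur * 10 + PySem.List.pyGetD K i 0,
            PySem.List.pySetD cnts i (PySem.List.pyGetD cnts i 0 - 1)))
          ((List.range K.length).map (fun k : Nat => (k : Int))) rest
        rw [hfoldr]
        set children := (((List.range K.length).map (fun k : Nat => (k : Int))).filter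
          (fun i => decide (PySem.List.pyGetD cnts i 0 ≠ 0
            ∧ (pos ≠ 0 ∨ PySem.List.pyGetD K i 0 ≠ 0)))).map
          (fun i => ((pos + 1 : Nat), cur * 10 + PySem.List.pyGetD K i 0,
            PySem.List.pySetD cnts i (PySem.List.pyGetD cnts i 0 - 1))) with hch
        have hchfr : ∀ fr ∈ children, fr.1 ≤ L ∧ fr.2.2.length = K.length := by
          intro fr hf
        -- children parameters
          rw [hch] at hf
          obtain ⟨i, hi, rfl⟩ := List.mem_map.mp hf
          have him : i ∈ (List.range K.length).map (fun k : Nat => (k : Int)) :=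
            List.mem_of_mem_filter hi
          obtain ⟨a, halt, hia⟩ : ∃ a : Nat, a < K.length ∧ i = (a : Int) := by
            obtain ⟨a, ha, hai⟩ := List.mem_map.mp him
            exact ⟨a, by simpa using ha, hai.symm⟩
          subst hia
          refine ⟨by omega, ?_⟩
          simp [PySem.List.pySetD_natCast, hclen]
        have hchlen : children.length ≤ K.length := by
          rw [hch, List.length_map]
          exact le_trans (List.length_filter_le _ _) (by simp)
        have hchsum : (children.map (fun fr => (K.length + 1) ^ (L - fr.1 + 1))).sum
            ≤ K.length * (K.length + 1) ^ (L - pos) := by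
          have hc : ∀ fr ∈ children, (fun fr => (K.length + 1) ^ (L - fr.1 + 1)) fr
              = (fun _ => (K.length + 1) ^ (L - pos)) fr := by
            intro fr hf
            rw [hch] at hf
            obtain ⟨i, hi, rfl⟩ := List.mem_map.mp hf
            have he : L - (pos + 1) + 1 = L - pos := by omega
            simp only [he]
          rw [List.map_congr_left hc, List.map_const', List.sum_replicate, smul_eq_mul]
          exact Nat.mul_le_mul_right _ hchlen
        have hfuel : ((children ++ rest).map
            (fun fr => (K.length + 1) ^ (L - fr.1 + 1))).sum ≤ f := by
          simp only [List.map_append, List.sum_append]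
          simp only [List.map_cons, List.sum_cons] at hsum
          have hpow : (K.length + 1) ^ (L - pos + 1)
              = (K.length + 1) * (K.length + 1) ^ (L - pos) := by
            rw [← pow_succ']
          have hmul : K.length * (K.length + 1) ^ (L - pos)
                + (K.length + 1) ^ (L - pos)
              = (K.length + 1) * (K.length + 1) ^ (L - pos) := by ring
          have hpos1 : 0 < (K.length + 1) ^ (L - pos) := Nat.pow_pos (by omega)
          have := hchsum
          omega
        rw [ih (children ++ rest) out (by
          intro fr hf
          rcases List.mem_append.mp hf with hf | hf
          · exact hchfr fr hf
          · exact hfr fr (by simp [hf])) hfuel]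
        rw [List.flatMap_append, List.flatMap_cons]
        congr 1
        congr 1
        -- children results are exactly one unfolding of the reference recursion
        rw [hch, List.flatMap_map]
        rw [pv_flatMap_filter
          (fun i => PySem.List.pyGetD cnts i 0 ≠ 0 ∧ (pos ≠ 0 ∨ PySem.List.pyGetD K i 0 ≠ 0)) _ _]
        rw [List.flatMap_map]
        refine Eq.trans (pv_range_flatMap_eq K _
          (fun d => if pvBLookup K cnts d ≠ 0 ∧ (pos ≠ 0 ∨ d ≠ 0) then
            pvM sign L K (pos + 1)
              (fun x => if x = d then pvBLookup K cnts d - 1 else pvBLookup K cnts x)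
              (cur * 10 + d)
          else []) ?_) ?_
        case _ =>
          intro k hk
          dsimp only
          have hgK : PySem.List.pyGetD K (k : Int) 0 = K[k] := by
            simp [List.getD_eq_getElem?_getD, List.getElem?_eq_getElem hk]
          have hgc : PySem.List.pyGetD cnts (k : Int) 0 = cnts.getD k 0 := by simp
          have hlookup : pvBLookup K cnts K[k] = cnts.getD k 0 := by
            unfold pvBLookup
            rw [pv_index?_getElem K hnd k hk]
            simp
          rw [hgK, hgc]
          simp only [PySem.List.pySetD_natCast]
          rw [hlookup]
          by_cases hcond : cnts.getD k 0 ≠ 0 ∧ (pos ≠ 0 ∨ K[k] ≠ 0)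
          · rw [if_pos hcond, if_pos hcond]
            rw [pv_blookup_set K cnts hnd k hk (by omega) (cnts.getD k 0 - 1)]
          · rw [if_neg hcond, if_neg hcond]
        case _ =>
          dsimp only
          rw [pvM, if_neg (by omega)]
          rw [pv_foldl_if_append
            (fun d => pvBLookup K cnts d ≠ 0 ∧ (pos ≠ 0 ∨ d ≠ 0))
            (fun d => pvM sign L K (pos + 1)
              (fun x => if x = d then pvBLookup K cnts d - 1 else pvBLookup K cnts x)
              (cur * 10 + d))]
          rw [List.nil_append]

theorem pv_count_fn (xs : List Int) (hnx : xs.Nodup) :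
    (fun k => ((xs.count k : Nat) : Int)) = fun t => if t ∈ xs then 1 else 0 := by
  funext t
  by_cases ht : t ∈ xs
  · rw [if_pos ht, List.count_eq_one_of_mem hnx ht]; norm_num
  · rw [if_neg ht, List.count_eq_zero_of_not_mem ht]; norm_num

theorem digit_permutations_spec' : ∀ (n : Int),
    digit_permutations n = digit_permutations_alt n := by
  intro n
  unfold digit_permutations digit_permutations_alt
  have habs : (0:Int) ≤ |n| := abs_nonneg n
  have hdig := pv_toChars_digits |n| habs
  have hne := pv_toChars_ne_nil |n| habs
  set ds := PySem.Int.toChars |n| with hds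
  set sign : Int := if n < 0 then -1 else 1 with hsign
  set xs : List Int := ds.map pvCharInt with hxs
  set L : Nat := ds.length with hL
  -- B side
  obtain ⟨e1, e2, e3, e4⟩ := pv_build ds [] [] List.nodup_nil rfl
  set kc := ds.foldl pvBuildStep ([], []) with hkc
  have hofl : List.foldl PySem.Set.add [] xs = PySem.Set.ofList xs := rfl
  have hK1 : kc.1 = PySem.Set.ofList xs := by rw [hkc, e1, hofl]
  have hlk : pvBLookup kc.1 kc.2 = fun k => ((xs.count k : Nat) : Int) := by
    funext k
    have := e4 k
    rw [hkc] at this ⊢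
    rw [this]
    have h0 : pvBLookup [] [] k = 0 := rfl
    rw [h0, zero_add]
  have hB : pvLoop sign L kc.1 ((kc.1.length + 1) ^ (L + 1)) [(0, 0, kc.2)] []
      = pvM sign L (PySem.Set.ofList xs) 0 (fun k => ((xs.count k : Nat) : Int)) 0 := by
    rw [pv_loop_eq sign L kc.1 e2 _ [(0, 0, kc.2)] []
      (by intro fr hf; simp at hf; subst hf; exact ⟨Nat.zero_le _, e3⟩)
      (by simp)]
    simp only [List.flatMap_cons, List.flatMap_nil, List.nil_append, List.append_nil]
    rw [hlk, hK1]
  rw [hB]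
  -- A side
  by_cases hcond : (PySem.Set.ofList ds).length = ds.length
  · rw [if_pos hcond]
    have hndds : ds.Nodup := pv_nodup_of_setlen ds hcond
    have hnx : xs.Nodup := by
      rw [hxs]
      refine List.Nodup.map_on ?_ hndds
      intro x hx y hy he
      exact pvCharInt_inj x y (hdig x hx) (hdig y hy) he
    rw [pv_fast sign ds hdig hndds hne]
    rw [pv_ofList_of_nodup xs hnx, pv_count_fn xs hnx]
    rfl
  · rw [if_neg hcond]
    rw [pv_btA_eq_pvM sign L L 0 (PySem.Dict.counter xs) 0 (Nat.zero_le _) (by omega)]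
    rw [PySem.Dict.keys_counter]
    congr 1
    funext k
    rw [PySem.Dict.getD_counter]

-- ===== VERDICT (by name: the statement is the Claim_ definition above) =====
theorem digit_permutations_spec : Claim_equal_digit_permutations := by
  intro n _
  exact digit_permutations_spec' n
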